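-- pv_equiv track=rewrite | github.com/bpopeters/2022-shared-tasks | segmentation/scripts/sentence2word.py | get_segmented_words
-- ===== SOURCE A (Python) =====
-- def get_segmented_words(segment_seq):
--     segment_seq = segment_seq.split()
--     assert not segment_seq[0].startswith("@@")
--     words = []
--     for segment in segment_seq:
--         if not segment.startswith("@@"):
--             new_word = [segment]
--             words.append(new_word)
--         else:
--             words[-1].append(segment)
--     return [" ".join(word) for word in words]
-- ===== SOURCE B (Python) =====
-- def get_segmented_words(segment_seq):
--     tokens = segment_seq.split()
--     assert not tokens[0].startswith("@@")
--     starts = [i for i, t in enumerate(tokens) if not t.startswith("@@")]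
--     bounds = starts + [len(tokens)]
--     return [" ".join(tokens[a:b]) for a, b in zip(bounds, bounds[1:])]
-- ===== Notes on version B (the rewrite author's own statement) =====
-- stated objective: alternative
-- what changed: B replaces A's single accumulator loop that grows sublists and appends to the last one with a staged boundary-index algorithm: it first collects the indices of tokens that start a word, then slices the token list between consecutive boundaries and joins each slice.
import Mathlib
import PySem

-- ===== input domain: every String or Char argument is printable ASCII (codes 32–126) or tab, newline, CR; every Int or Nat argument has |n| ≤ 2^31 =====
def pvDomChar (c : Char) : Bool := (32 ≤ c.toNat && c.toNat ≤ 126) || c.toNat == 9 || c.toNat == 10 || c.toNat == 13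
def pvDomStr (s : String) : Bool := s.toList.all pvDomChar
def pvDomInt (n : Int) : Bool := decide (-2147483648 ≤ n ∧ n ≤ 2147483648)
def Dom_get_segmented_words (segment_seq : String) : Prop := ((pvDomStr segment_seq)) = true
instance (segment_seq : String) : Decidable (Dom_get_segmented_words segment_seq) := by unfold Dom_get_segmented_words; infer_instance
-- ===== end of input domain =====

-- B replaces A's single accumulator loop (grow sublists, append to the last one) by a staged
-- boundary-index computation: collect the indices of word-start tokens, then slice the token
-- list between consecutive boundaries and join each slice; alternative algorithm, same cost.

-- ===== PORT A =====
-- words[-1].append(segment): extend the LAST sublist ([] unreachable under Pre_)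
def pvAppendLast : List (List String) → String → List (List String)
  | [], _ => []
  | [w], s => [w ++ [s]]
  | w :: ws, s => w :: pvAppendLast ws s

def pvLoopA : List (List String) → List String → List (List String)
  | words, [] => words
  | words, seg :: rest =>
      if PySem.Str.startswith seg "@@" = false then pvLoopA (words ++ [[seg]]) rest
      else pvLoopA (pvAppendLast words seg) rest

def get_segmented_words (segment_seq : String) : List String :=
  (pvLoopA [] (PySem.Str.split₀ segment_seq)).map (fun w => PySem.Str.join " " w)

-- ===== PORT B =====
def get_segmented_words_alt (segment_seq : String) : List String :=
  let tokens := PySem.Str.split₀ segment_seq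
  let starts := (PySem.List.enumerate tokens).filterMap
      (fun p => if PySem.Str.startswith p.2 "@@" = false then some p.1 else none)
  let bounds := starts ++ [(tokens.length : Int)]
  (bounds.zip bounds.tail).map
    (fun p => PySem.Str.join " " (PySem.List.slice tokens (some p.1) (some p.2)))

-- ===== PRECONDITION & SPEC =====
-- Pre_ excludes exactly the inputs where the Python raises: an all-whitespace input
-- (tokens[0] raises IndexError) or a first token starting with "@@" (the assert fires);
-- B raises identically there.
def Pre_get_segmented_words (segment_seq : String) : Prop :=
  PySem.Str.split₀ segment_seq ≠ [] ∧
  PySem.Str.startswith ((PySem.Str.split₀ segment_seq).headD "") "@@" = false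
instance (segment_seq : String) : Decidable (Pre_get_segmented_words segment_seq) := by
  unfold Pre_get_segmented_words; infer_instance
def pvWitness_get_segmented_words : String := "ab @@c d"

def Spec_get_segmented_words (segment_seq : String) (out : List String) : Prop := out = get_segmented_words_alt segment_seq
instance (segment_seq : String) (out : List String) : Decidable (Spec_get_segmented_words segment_seq out) := by unfold Spec_get_segmented_words; infer_instance

-- ===== CLAIM (what is proved, stated in full; the proofs are below) =====
def Claim_equal_get_segmented_words : Prop := ∀ (segment_seq : String), Dom_get_segmented_words segment_seq → Pre_get_segmented_words segment_seq → Spec_get_segmented_words segment_seq (get_segmented_words segment_seq)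

-- ===== LEMMAS AND PROOFS =====

-- canonical grouping: the list of words as token sublists, head of each a word start
def pvGroups : List String → List String → List (List String)
  | w, [] => [w]
  | w, t :: rest =>
      if PySem.Str.startswith t "@@" then pvGroups (w ++ [t]) rest else w :: pvGroups [t] rest

-- a well-formed group: nonempty, head a word start, all later tokens continuations
def pvGood (g : List String) : Prop :=
  ∃ h tl, g = h :: tl ∧ PySem.Str.startswith h "@@" = false ∧
    ∀ t ∈ tl, PySem.Str.startswith t "@@" = true

theorem appendLast_snoc : ∀ (ws : List (List String)) (w : List String) (t : String),
    pvAppendLast (ws ++ [w]) t = ws ++ [w ++ [t]] := by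
  intro ws
  induction ws with
  | nil => intro w t; simp [pvAppendLast]
  | cons x xs ih =>
    intro w t
    have hne : xs ++ [w] ≠ [] := by simp
    cases h : xs ++ [w] with
    | nil => exact absurd h hne
    | cons c cs =>
      simp only [List.cons_append, h, pvAppendLast]
      rw [← h, ih]

theorem loopA_groups : ∀ (toks : List String) (ws : List (List String)) (w : List String),
    pvLoopA (ws ++ [w]) toks = ws ++ pvGroups w toks := by
  intro toks
  induction toks with
  | nil => intro ws w; simp [pvLoopA, pvGroups]
  | cons t rest ih =>
    intro ws w
    by_cases hs : PySem.Str.startswith t "@@" = true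
    · simp only [pvLoopA, pvGroups, hs, if_true]
      rw [if_neg (by simp), appendLast_snoc, ih]
    · rw [Bool.not_eq_true] at hs
      simp only [pvLoopA, pvGroups, hs]
      rw [show (ws ++ [w]) ++ [[t]] = (ws ++ [w]) ++ [[t]] from rfl]
      rw [ih (ws ++ [w]) [t]]
      simp

theorem flatten_groups : ∀ (toks : List String) (w : List String),
    (pvGroups w toks).flatten = w ++ toks := by
  intro toks
  induction toks with
  | nil => intro w; simp [pvGroups]
  | cons t rest ih =>
    intro w
    by_cases hs : PySem.Str.startswith t "@@" = true
    · simp only [pvGroups, hs, if_true]; rw [ih]; simp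
    · rw [Bool.not_eq_true] at hs
      simp only [pvGroups, hs, Bool.false_eq_true, if_false, List.flatten_cons]
      rw [ih]
      simp

theorem groups_good : ∀ (toks : List String) (h : String) (tl : List String),
    PySem.Str.startswith h "@@" = false →
    (∀ t ∈ tl, PySem.Str.startswith t "@@" = true) →
    ∀ g ∈ pvGroups (h :: tl) toks, pvGood g := by
  intro toks
  induction toks with
  | nil =>
    intro h tl hh htl g hg
    simp [pvGroups] at hg
    exact ⟨h, tl, hg, hh, htl⟩
  | cons t rest ih =>
    intro h tl hh htl g hg
    by_cases hs : PySem.Str.startswith t "@@" = true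
    · simp only [pvGroups, hs, if_true] at hg
      have : h :: tl ++ [t] = h :: (tl ++ [t]) := by simp
      rw [this] at hg
      refine ih h (tl ++ [t]) hh ?_ g hg
      intro x hx
      rcases List.mem_append.1 hx with hx | hx
      · exact htl x hx
      · simp at hx; simpa [hx] using hs
    · rw [Bool.not_eq_true] at hs
      simp only [pvGroups, hs, Bool.false_eq_true, if_false, List.mem_cons] at hg
      rcases hg with hg | hg
      · exact ⟨h, tl, hg, hh, htl⟩
      · exact ih t [] hs (by simp) g hg

-- the word-start index list of a token sequence placed after a prefix `pre`
def pvStarts (pre toks : List String) : List Int :=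
  (PySem.List.enumerate toks (pre.length : Int)).filterMap
    (fun p => if PySem.Str.startswith p.2 "@@" = false then some p.1 else none)

theorem starts_all_cont : ∀ (tl : List String) (s : Int),
    (∀ t ∈ tl, PySem.Str.startswith t "@@" = true) →
    (PySem.List.enumerate tl s).filterMap
      (fun p => if PySem.Str.startswith p.2 "@@" = false then some p.1 else none) = [] := by
  intro tl
  induction tl with
  | nil => intro s _; simp [PySem.List.enumerate_nil]
  | cons t rest ih =>
    intro s h
    rw [PySem.List.enumerate_cons, List.filterMap_cons]
    have ht : PySem.Str.startswith t "@@" = true := h t (by simp)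
    simp only [ht]
    rw [if_neg (by simp)]
    exact ih (s + 1) (fun x hx => h x (List.mem_cons_of_mem _ hx))

theorem starts_cons (pre g toks : List String) (hg : pvGood g) :
    pvStarts pre (g ++ toks) = (pre.length : Int) :: pvStarts (pre ++ g) toks := by
  rcases hg with ⟨h, tl, rfl, hh, htl⟩
  unfold pvStarts
  rw [PySem.List.enumerate_append, List.filterMap_append,
      PySem.List.enumerate_cons, List.filterMap_cons]
  simp only [hh]
  rw [starts_all_cont tl _ htl]
  have hoff : (pre.length : Int) + ((h :: tl).length : Int) = ((pre ++ h :: tl).length : Int) := by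
    push_cast [List.length_append]; ring
  rw [hoff]
  simp

-- slicing the flattened groups between consecutive boundaries recovers the groups
theorem slice_groups : ∀ (gs : List (List String)) (pre : List String),
    (∀ g ∈ gs, pvGood g) →
    ((pvStarts pre gs.flatten ++ [((pre ++ gs.flatten).length : Int)]).zip
      (pvStarts pre gs.flatten ++ [((pre ++ gs.flatten).length : Int)]).tail).map
        (fun p => PySem.List.slice (pre ++ gs.flatten) (some p.1) (some p.2)) = gs := by
  intro gs
  induction gs with
  | nil =>
    intro pre _
    simp [pvStarts, PySem.List.enumerate_nil]
  | cons g gs ih =>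
    intro pre hgood
    have hg : pvGood g := hgood g (by simp)
    simp only [List.flatten_cons]
    rw [show pre ++ (g ++ gs.flatten) = (pre ++ g) ++ gs.flatten from by simp,
        show g ++ gs.flatten = g ++ gs.flatten from rfl]
    rw [starts_cons pre g gs.flatten hg]
    have hrest := ih (pre ++ g) (fun x hx => hgood x (List.mem_cons_of_mem _ hx))
    -- the boundary list of the tail; it is nonempty and starts with (pre ++ g).length
    have hhead : (pvStarts (pre ++ g) gs.flatten ++ [(((pre ++ g) ++ gs.flatten).length : Int)]).headD 0
        = (((pre ++ g).length : Nat) : Int) := by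
      cases gs with
      | nil => simp [pvStarts, PySem.List.enumerate_nil]
      | cons g2 gs2 =>
        have hg2 : pvGood g2 := hgood g2 (by simp)
        simp only [List.flatten_cons]
        rw [show g2 ++ gs2.flatten = g2 ++ gs2.flatten from rfl, starts_cons (pre ++ g) g2 _ hg2]
        simp
    cases hb : pvStarts (pre ++ g) gs.flatten ++ [(((pre ++ g) ++ gs.flatten).length : Int)] with
    | nil => exact absurd hb (by simp)
    | cons b bs =>
      have hbv : b = (((pre ++ g).length : Nat) : Int) := by
        have := hhead; rw [hb] at this; simpa using this
      rw [List.cons_append]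
      rw [hb] at hrest ⊢
      rw [List.tail_cons] at hrest
      rw [List.tail_cons, List.zip_cons_cons, List.map_cons, hrest]
      have hfirst : PySem.List.slice (pre ++ g ++ gs.flatten)
          (some (pre.length : Int)) (some b) = g := by
        rw [hbv, PySem.List.slice_natCast,
            show pre ++ g ++ gs.flatten = pre ++ (g ++ gs.flatten) from by simp,
            List.drop_left,
            show (pre ++ g).length - pre.length = g.length from by simp]
        exact List.take_left ..
      rw [hfirst]

theorem join_filterMap_map (gs : List (List String)) (toks : List String) (bnds : List Int)
    (h : (bnds.zip bnds.tail).map (fun p => PySem.List.slice toks (some p.1) (some p.2)) = gs) :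
    (bnds.zip bnds.tail).map (fun p => PySem.Str.join " " (PySem.List.slice toks (some p.1) (some p.2)))
      = gs.map (fun w => PySem.Str.join " " w) := by
  rw [← h, List.map_map]
  rfl

-- ===== VERDICT (by name: the statement is the Claim_ definition above) =====
theorem get_segmented_words_spec : Claim_equal_get_segmented_words := by
  intro s _ hpre
  obtain ⟨hne, hh⟩ := hpre
  unfold Spec_get_segmented_words get_segmented_words get_segmented_words_alt
  cases htoks : PySem.Str.split₀ s with
  | nil => exact absurd htoks hne
  | cons t rest =>
    rw [htoks] at hh
    simp only [List.headD_cons] at hh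
    -- A side: pvLoopA [] (t :: rest) = pvGroups [t] rest
    have hA : pvLoopA [] (t :: rest) = pvGroups [t] rest := by
      simp only [pvLoopA, hh]
      have := loopA_groups rest [] [t]
      simpa using this
    rw [hA]
    -- B side
    have hgood : ∀ g ∈ pvGroups [t] rest, pvGood g :=
      groups_good rest t [] hh (by simp)
    have hflat : (pvGroups [t] rest).flatten = t :: rest := by
      rw [flatten_groups]; rfl
    have hsl := slice_groups (pvGroups [t] rest) [] hgood
    rw [hflat] at hsl
    simp only [List.nil_append] at hsl
    have hstarts : pvStarts [] (t :: rest)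
        = (PySem.List.enumerate (t :: rest)).filterMap
            (fun p => if PySem.Str.startswith p.2 "@@" = false then some p.1 else none) := by
      unfold pvStarts; norm_num [PySem.List.enumerate]
    rw [hstarts] at hsl
    exact (join_filterMap_map _ _ _ hsl).symm
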